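-- pv_equiv track=rewrite | github.com/alexsjmaia/estacionamento | app.py | normalizar_codigo_marca_digitado
-- ===== SOURCE A (Python) =====
-- def normalizar_codigo_marca_digitado(texto):
--     texto = (texto or "").strip()
--     if not texto:
--         return ""
--
--     inicio = []
--     for caractere in texto:
--         if caractere.isdigit():
--             inicio.append(caractere)
--             continue
--         break
--
--     if inicio:
--         return "".join(inicio)
--
--     somente_numeros = "".join(ch for ch in texto if ch.isdigit())
--     return somente_numeros[:3]
-- ===== SOURCE B (Python) =====
-- def normalizar_codigo_marca_digitado(texto):
--     t = (texto or "").strip()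
--     leading, lead, alld = True, [], []
--     for c in t:
--         if c.isdigit():
--             if leading:
--                 lead.append(c)
--             alld.append(c)
--         else:
--             leading = False
--     if lead:
--         return "".join(lead)
--     return "".join(alld[:3])
-- ===== Notes on version B (the rewrite author's own statement) =====
-- stated objective: alternative
-- what changed: Replaces A's break-on-first-non-digit loop plus a separate digit-filtering comprehension with one single pass that maintains a leading flag and collects the leading digits and all digits simultaneously.
import Mathlib
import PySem

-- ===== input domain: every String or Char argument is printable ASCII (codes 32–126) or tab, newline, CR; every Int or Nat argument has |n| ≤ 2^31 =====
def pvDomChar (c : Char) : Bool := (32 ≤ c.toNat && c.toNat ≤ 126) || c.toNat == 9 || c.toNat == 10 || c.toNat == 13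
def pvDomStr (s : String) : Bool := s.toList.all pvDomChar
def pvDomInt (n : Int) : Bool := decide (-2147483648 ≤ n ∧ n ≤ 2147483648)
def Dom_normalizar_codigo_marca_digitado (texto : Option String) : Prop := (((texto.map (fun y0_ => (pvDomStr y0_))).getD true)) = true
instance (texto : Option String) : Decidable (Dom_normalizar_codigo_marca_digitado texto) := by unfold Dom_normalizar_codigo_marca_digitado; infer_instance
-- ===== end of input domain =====

-- B is one linear pass with a leading flag collecting leading digits and all digits at once,
-- instead of A's break-loop followed by a separate digit-filter comprehension; same cost, different decomposition.

-- ===== PORT A =====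
-- A's 'for caractere in texto: append-or-break' loop: recursion that stops at the first non-digit
def pvA_inicio : List Char → List Char
  | [] => []
  | c :: rest => if PySem.Chars.isdigit c then c :: pvA_inicio rest else []

def normalizar_codigo_marca_digitado (texto : Option String) : String :=
  let t := (PySem.Str.strip (texto.getD "")).toList
  if t = [] then ""
  else
    let inicio := pvA_inicio t
    if inicio ≠ [] then String.ofList inicio
    else
      let somente_numeros := t.filter PySem.Chars.isdigit
      String.ofList (PySem.List.slice somente_numeros none (some 3))

-- ===== PORT B =====
-- B's loop body: state = (leading flag, leading digits so far, all digits so far)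
def pvB_step : (Bool × List Char × List Char) → Char → (Bool × List Char × List Char)
  | (leading, lead, alld), c =>
    if PySem.Chars.isdigit c then
      (leading, (if leading then lead ++ [c] else lead), alld ++ [c])
    else
      (false, lead, alld)

def normalizar_codigo_marca_digitado_alt (texto : Option String) : String :=
  let t := (PySem.Str.strip (texto.getD "")).toList
  let st := t.foldl pvB_step (true, [], [])
  if st.2.1 ≠ [] then String.ofList st.2.1
  else String.ofList (st.2.2.take 3)

-- ===== PRECONDITION & SPEC =====
def Spec_normalizar_codigo_marca_digitado (texto : Option String) (out : String) : Prop := out = normalizar_codigo_marca_digitado_alt texto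
instance (texto : Option String) (out : String) : Decidable (Spec_normalizar_codigo_marca_digitado texto out) := by unfold Spec_normalizar_codigo_marca_digitado; infer_instance

-- ===== CLAIM (what is proved, stated in full; the proofs are below) =====
def Claim_equal_normalizar_codigo_marca_digitado : Prop := ∀ (texto : Option String), Dom_normalizar_codigo_marca_digitado texto → Spec_normalizar_codigo_marca_digitado texto (normalizar_codigo_marca_digitado texto)

-- ===== LEMMAS AND PROOFS =====

-- once the leading flag is False, the fold only accumulates digits into the third component
lemma pvB_fold_false (cs : List Char) (lead alld : List Char) :
    cs.foldl pvB_step (false, lead, alld) = (false, lead, alld ++ cs.filter PySem.Chars.isdigit) := by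
  induction cs generalizing alld with
  | nil => simp
  | cons c rest ih =>
    by_cases h : PySem.Chars.isdigit c
    · simp [pvB_step, h, ih]
    · simp [pvB_step, h, ih]

-- while the flag is True, the fold accumulates A's leading digits and A's filtered digits
lemma pvB_fold_true (cs : List Char) (lead alld : List Char) :
    (cs.foldl pvB_step (true, lead, alld)).2.1 = lead ++ pvA_inicio cs ∧
    (cs.foldl pvB_step (true, lead, alld)).2.2 = alld ++ cs.filter PySem.Chars.isdigit := by
  induction cs generalizing lead alld with
  | nil => simp [pvA_inicio]
  | cons c rest ih =>
    by_cases h : PySem.Chars.isdigit c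
    · simpa [pvB_step, pvA_inicio, h] using ih (lead ++ [c]) (alld ++ [c])
    · simp [pvB_step, pvA_inicio, h, pvB_fold_false]

-- ===== VERDICT (by name: the statement is the Claim_ definition above) =====
theorem normalizar_codigo_marca_digitado_spec : Claim_equal_normalizar_codigo_marca_digitado := by
  intro texto _
  show _ = _
  unfold normalizar_codigo_marca_digitado normalizar_codigo_marca_digitado_alt
  set cs := (PySem.Str.strip (texto.getD "")).toList with hcs
  obtain ⟨h1, h2⟩ := pvB_fold_true cs [] []
  simp only [List.nil_append] at h1 h2
  by_cases hnil : cs = []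
  · simp only [hnil, if_true]; rfl
  · simp [hnil, h1, h2, PySem.List.slice_to]
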